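-- pv_equiv track=rewrite | github.com/williampayne23/learning | AdventOfCode/2025/python/d06/main.py | solution_part_2
-- ===== SOURCE A (Python) =====
-- from functools import reduce
--
-- def add(a, b):
--     return a + b
--
-- def mult(a, b):
--     return a * b
--
-- def get_single_char_column(lines, i):
--     return [line[i] for line in lines]
--
-- def solve_one_column(lines, i):
--     col = get_single_char_column(lines, i)
--     operator = col.pop()
--     assert operator == "+" or operator == "*", (
--         f"Operator invalid! got {operator}, i = {i}"
--     )
--     col = int("".join(col))
--     cols = [col]
--
--     i += 1
--     while i < len(lines[0]):
--         col = get_single_char_column(lines, i)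
--         col.pop()  # pop operator line
--         col = "".join(col).strip()
--         i += 1
--         if col == "":
--             break
--         cols.append(int(col))
--     return i, reduce(add if operator == "+" else mult, cols)
--
-- def solution_part_2(input):
--     lines = input.split("\n")
--     lines.pop()  # pop newline
--     length = len(lines[0])
--     i = 0
--     total = 0
--     while i < length:
--         i, answer = solve_one_column(lines, i)
--         total += answer
--     return total
-- ===== SOURCE B (Python) =====
-- def solution_part_2(input):
--     lines = input.split("\n")
--     lines.pop()  # pop newline
--     width = len(lines[0])
--     # materialize the columns once (index, not zip: a short line must still raise IndexError)
--     cols = ["".join(line[i] for line in lines) for i in range(width)]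
--     total = 0
--     group = None  # None, or (is_add, accumulated value) for the group in progress
--     for c in cols:
--         body, op = c[:-1], c[-1]
--         if group is None:
--             assert op == "+" or op == "*", f"Operator invalid! got {op}"
--             group = (op == "+", int(body))
--         else:
--             is_add, acc = group
--             s = body.strip()
--             if s == "":
--                 total += acc
--                 group = None
--             else:
--                 group = (is_add, acc + int(s) if is_add else acc * int(s))
--     if group is not None:
--         total += group[1]
--     return total
-- ===== Notes on version B (the rewrite author's own statement) =====
-- stated objective: alternative
-- what changed: A walks the grid by a column index through nested while-loops (an outer group loop calling a helper that re-reads columns and collects a list to reduce); B materializes the column strings once and makes a single state-machine pass over them, folding each group's value incrementally instead of collecting and reducing.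
import Mathlib
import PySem

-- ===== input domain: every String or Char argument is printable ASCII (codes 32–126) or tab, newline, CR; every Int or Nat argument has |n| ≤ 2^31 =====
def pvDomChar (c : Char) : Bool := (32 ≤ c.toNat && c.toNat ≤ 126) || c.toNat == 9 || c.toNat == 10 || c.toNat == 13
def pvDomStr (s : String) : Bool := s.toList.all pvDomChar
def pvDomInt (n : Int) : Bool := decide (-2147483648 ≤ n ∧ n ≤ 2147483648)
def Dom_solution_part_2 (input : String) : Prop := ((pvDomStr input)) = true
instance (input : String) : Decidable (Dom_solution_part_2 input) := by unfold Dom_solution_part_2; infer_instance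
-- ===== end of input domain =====

-- B replaces A's index-driven nested while loops by materializing the column strings once and
-- running a single state-machine pass over them (alternative decomposition, same cost).

-- ===== PORT A =====
-- lines = input.split("\n"); lines.pop()  (shared by both ports; split("\n") is never
-- empty, so pop() is safe; sep ≠ "", so the total splitOn form is exact)
def pvLines (input : String) : List (List Char) :=
  (PySem.Chars.splitOn input.toList ['\n']).dropLast

-- get_single_char_column(lines, i): [line[i] for line in lines]; none = IndexError
def pvColA (lines : List (List Char)) (i : Int) : Option (List Char) :=
  lines.mapM (fun line => PySem.List.pyGet? line i)

-- add/mult chosen by the operator (reduce(add if operator == "+" else mult, …))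
def pvOpFn (op : Char) : Int → Int → Int :=
  if op = '+' then (· + ·) else (· * ·)

-- the inner `while i < len(lines[0]):` loop of solve_one_column, collecting cols
def solveInnerA (lines : List (List Char)) (L : Nat) (i : Nat) (acc : List Int) :
    Option (Nat × List Int) :=
  if _h : i < L then
    match pvColA lines i with
    | none => none
    | some col =>
      match col.getLast? with          -- col.pop(): IndexError on empty
      | none => none
      | some _ =>
        let s := PySem.Chars.strip col.dropLast
        if s = [] then some (i + 1, acc)
        else
          match PySem.Int.ofChars? s with   -- int(col); none = ValueError
          | none => none
          | some v => solveInnerA lines L (i + 1) (acc ++ [v])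
  else some (i, acc)
termination_by L - i
decreasing_by omega

-- solve_one_column(lines, i)
def solveOneA (lines : List (List Char)) (L : Nat) (i : Nat) : Option (Nat × Int) :=
  match pvColA lines i with
  | none => none
  | some col =>
    match col.getLast? with            -- operator = col.pop()
    | none => none
    | some op =>
      if op = '+' ∨ op = '*' then      -- assert; none = AssertionError
        match PySem.Int.ofChars? col.dropLast with  -- int("".join(col))
        | none => none
        | some v =>
          match solveInnerA lines L (i + 1) [v] with
          | none => none
          | some (i', lst) =>
            match lst with
            | [] => none
            | x :: xs => some (i', xs.foldl (pvOpFn op) x)   -- reduce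
      else none

-- the outer `while i < length:` loop of solution_part_2 (the `else none` branch is a
-- totality guard only; solveOneA always returns a strictly larger index)
def outerA (lines : List (List Char)) (L : Nat) (i : Nat) (total : Int) : Option Int :=
  if _h : i < L then
    match solveOneA lines L i with
    | none => none
    | some (i', ans) =>
      if _h2 : i < i' then outerA lines L i' (total + ans) else none
  else some total
termination_by L - i
decreasing_by omega

def solution_part_2 (input : String) : Int :=
  match PySem.List.pyGet? (pvLines input) 0 with   -- lines[0]; none = IndexError
  | none => 0
  | some first =>
    match outerA (pvLines input) first.length 0 0 with
    | some t => t
    | none => 0   -- an exception escaped (input outside Pre_)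

-- ===== PORT B =====
-- one step of B's state machine; state = (total, pending group as (is_add, acc))
def pvStepB (st : Int × Option (Bool × Int)) (c : List Char) :
    Option (Int × Option (Bool × Int)) :=
  match c.getLast? with                -- op = c[-1]; IndexError on empty
  | none => none
  | some op =>
    match st.2 with
    | none =>                          -- group start
      if op = '+' ∨ op = '*' then
        match PySem.Int.ofChars? c.dropLast with   -- int(body)
        | none => none
        | some v => some (st.1, some (decide (op = '+'), v))
      else none
    | some (isAdd, acc) =>
      let s := PySem.Chars.strip c.dropLast        -- body.strip()
      if s = [] then some (st.1 + acc, none)       -- separator: close the group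
      else
        match PySem.Int.ofChars? s with
        | none => none
        | some v => some (st.1, some (isAdd, if isAdd then acc + v else acc * v))

def solution_part_2_alt (input : String) : Int :=
  match PySem.List.pyGet? (pvLines input) 0 with
  | none => 0
  | some first =>
    -- cols = ["".join(line[i] for line in lines) for i in range(width)]
    match (List.range first.length).mapM
        (fun i : Nat => (pvLines input).mapM (fun l => PySem.List.pyGet? l (i : Int))) with
    | none => 0
    | some cols =>
      match cols.foldlM pvStepB (0, (none : Option (Bool × Int))) with
      | none => 0
      | some (total, none) => total
      | some (total, some (_, acc)) => total + acc   -- flush the last group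

-- ===== PRECONDITION & SPEC =====
-- the column strings of the grid (used only to state the grammar below)
def pvCols (lines : List (List Char)) (L : Nat) : List (List Char) :=
  (List.range L).map (fun i => lines.map (fun l => l.getD i ' '))

-- grammar of a well-formed grid, column by column: a group-start column carries operator
-- '+'/'*' and an int-parsable body; later columns are int-parsable or blank (group separator)
def pvWF : List (List Char) → Bool → Bool
  | [], _ => true
  | c :: rest, atStart =>
    match c.getLast? with
    | none => false
    | some op =>
      if atStart then
        (op == '+' || op == '*') && (PySem.Int.ofChars? c.dropLast).isSome && pvWF rest false
      else
        if PySem.Chars.strip c.dropLast = [] then pvWF rest true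
        else (PySem.Int.ofChars? (PySem.Chars.strip c.dropLast)).isSome && pvWF rest false

-- Pre_ = exactly the inputs where A returns: at least one line before the popped tail, every
-- line at least as long as the first (else IndexError), and the columns match the grammar
-- (else AssertionError / ValueError)
def Pre_solution_part_2 (input : String) : Prop :=
  pvLines input ≠ [] ∧
  (∀ l ∈ pvLines input, (pvLines input).headI.length ≤ l.length) ∧
  pvWF (pvCols (pvLines input) (pvLines input).headI.length) true = true
instance (input : String) : Decidable (Pre_solution_part_2 input) := by
  unfold Pre_solution_part_2; infer_instance

def pvWitness_solution_part_2 : String := "12\n34\n+ \n"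

def Spec_solution_part_2 (input : String) (out : Int) : Prop := out = solution_part_2_alt input
instance (input : String) (out : Int) : Decidable (Spec_solution_part_2 input out) := by
  unfold Spec_solution_part_2; infer_instance

-- ===== CLAIM (what is proved, stated in full; the proofs are below) =====
def Claim_equal_solution_part_2 : Prop := ∀ (input : String), Dom_solution_part_2 input → Pre_solution_part_2 input → Spec_solution_part_2 input (solution_part_2 input)

-- ===== LEMMAS AND PROOFS =====

-- close B's fold state: add the pending group's accumulator, if any
def pvFinish : Option (Int × Option (Bool × Int)) → Option Int
  | none => none
  | some (t, none) => some t
  | some (t, some (_, a)) => some (t + a)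

theorem pv_witness_ok :
    Dom_solution_part_2 pvWitness_solution_part_2 ∧ Pre_solution_part_2 pvWitness_solution_part_2 := by
  decide

-- solveInnerA never moves the index backwards (lets the outer-loop guard be discharged)
theorem solveInnerA_le (lines : List (List Char)) (L i : Nat) (acc : List Int)
    (i' : Nat) (lst : List Int) (h : solveInnerA lines L i acc = some (i', lst)) : i ≤ i' := by
  fun_induction solveInnerA lines L i acc with
  | case1 => simp_all
  | case2 => simp_all
  | case3 => simp at h; omega
  | case4 => simp_all
  | case5 _ _ _ _ _ _ _ _ _ _ _ ih => have := ih h; omega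
  | case6 => simp at h; omega

-- a list comprehension over Option-valued f that never fails is a plain map
theorem pv_mapM_eq {α β : Type} (f : α → Option β) (g : α → β) (l : List α)
    (h : ∀ x ∈ l, f x = some (g x)) : l.mapM f = some (l.map g) := by
  induction l with
  | nil => rfl
  | cons a t ih =>
    simp [List.mapM_cons, h a (by simp), ih (fun x hx => h x (by simp [hx]))]

-- the combined loop invariant: A's outer loop (resp. A's in-progress inner loop + reduce +
-- outer continuation) computes what B's fold-from-state computes, over the remaining columns
theorem pv_main (lines : List (List Char)) (L : Nat)
    (hcol : ∀ i : Nat, i < L → pvColA lines (i : Int) = some ((pvCols lines L).getD i []))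
    (cs : List (List Char)) :
    ∀ i : Nat, (pvCols lines L).drop i = cs →
    ((pvWF cs true = true → ∀ total : Int,
        outerA lines L i total
          = pvFinish (cs.foldlM pvStepB (total, (none : Option (Bool × Int)))))
   ∧ (pvWF cs false = true → ∀ (op : Char), op = '+' ∨ op = '*' →
        ∀ (x : Int) (xs : List Int) (total : Int),
        (match solveInnerA lines L i (x :: xs) with
         | none => none
         | some (_, []) => none
         | some (i', y :: ys) => outerA lines L i' (total + ys.foldl (pvOpFn op) y))
        = pvFinish (cs.foldlM pvStepB
            (total, some (decide (op = '+'), xs.foldl (pvOpFn op) x))))) := by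
  induction cs with
  | nil =>
    intro i hdrop
    have hi : L ≤ i := by
      have := List.drop_eq_nil_iff.mp hdrop
      simpa [pvCols] using this
    constructor
    · intro _ total
      rw [outerA.eq_def]
      simp [Nat.not_lt.mpr hi, pvFinish, List.foldlM]
    · intro _ op hop x xs total
      have hres : solveInnerA lines L i (x :: xs) = some (i, x :: xs) := by
        rw [solveInnerA.eq_def]; simp [Nat.not_lt.mpr hi]
      rw [hres]
      simp [outerA.eq_def, Nat.not_lt.mpr hi, pvFinish, List.foldlM]
  | cons c cs' ih =>
    intro i hdrop
    have hlenC : (pvCols lines L).length = L := by simp [pvCols]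
    have hi : i < L := by
      rcases Nat.lt_or_ge i L with h | h
      · exact h
      · rw [List.drop_eq_nil_iff.mpr (by omega)] at hdrop
        exact absurd hdrop.symm (List.cons_ne_nil _ _)
    have hc : (pvCols lines L).getD i [] = c := by
      have h0 := congrArg (fun l => l.getD 0 ([] : List Char)) hdrop
      simpa [List.getD_eq_getElem?_getD, List.getElem?_drop] using h0
    have hdrop' : (pvCols lines L).drop (i + 1) = cs' := by
      have ht := congrArg List.tail hdrop
      simpa [List.tail_drop] using ht
    have hcolI := hcol i hi
    rw [hc] at hcolI
    constructor
    · -- A1: group start at column i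
      intro hwf total
      cases hlast : c.getLast? with
      | none => rw [pvWF] at hwf; simp [hlast] at hwf
      | some op =>
        obtain ⟨hop, ⟨v, hv⟩, hwf'⟩ :
            (op = '+' ∨ op = '*') ∧ (∃ v, PySem.Int.ofChars? c.dropLast = some v) ∧
              pvWF cs' false = true := by
          cases hv : PySem.Int.ofChars? c.dropLast with
          | none => simp [pvWF, hlast, hv] at hwf
          | some v =>
            have h := hwf
            simp [pvWF, hlast, hv] at h
            exact ⟨h.1, ⟨v, rfl⟩, h.2⟩
        -- B side: one fold step
        have hstep : pvStepB (total, (none : Option (Bool × Int))) c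
            = some (total, some (decide (op = '+'), v)) := by
          simp [pvStepB, hlast, hop, hv]
        have hIH := (ih (i + 1) hdrop').2 hwf' op hop v [] total
        -- A side: unfold one outer iteration
        rw [outerA.eq_def]
        simp only [dif_pos hi, solveOneA, hcolI, hlast, if_pos hop, hv]
        rw [List.foldlM_cons, hstep]
        simp only [Option.bind_eq_bind, Option.bind_some]
        simp only [List.foldl_nil] at hIH
        rw [← hIH]
        cases hres : solveInnerA lines L (i + 1) [v] with
        | none => simp
        | some r =>
          obtain ⟨i', lst⟩ := r
          have hlt : i < i' := by have := solveInnerA_le lines L (i + 1) [v] i' lst hres; omega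
          cases lst with
          | nil => simp
          | cons y ys => simp [dif_pos hlt]
    · -- A2: group in progress at column i
      intro hwf op hop x xs total
      cases hlast : c.getLast? with
      | none => rw [pvWF] at hwf; simp [hlast] at hwf
      | some op2 =>
        by_cases hsep : PySem.Chars.strip c.dropLast = []
        · -- separator column: the group closes, next column (if any) starts a group
          replace hwf : pvWF cs' true = true := by simpa [pvWF, hlast, hsep] using hwf
          have hres : solveInnerA lines L i (x :: xs) = some (i + 1, x :: xs) := by
            rw [solveInnerA.eq_def]
            simp [dif_pos hi, hcolI, hlast, hsep]
          rw [hres]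
          have hstep : pvStepB (total, some (decide (op = '+'), xs.foldl (pvOpFn op) x)) c
              = some (total + xs.foldl (pvOpFn op) x, none) := by
            simp [pvStepB, hlast, hsep]
          rw [List.foldlM_cons, hstep]
          simp only [Option.bind_eq_bind, Option.bind_some]
          exact (ih (i + 1) hdrop').1 hwf (total + xs.foldl (pvOpFn op) x)
        · -- value column: the group accumulates one more int
          obtain ⟨hwf', v, hv⟩ : pvWF cs' false = true ∧
              ∃ v, PySem.Int.ofChars? (PySem.Chars.strip c.dropLast) = some v := by
            cases hv : PySem.Int.ofChars? (PySem.Chars.strip c.dropLast) with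
            | none => simp [pvWF, hlast, hsep, hv] at hwf
            | some v => exact ⟨by simpa [pvWF, hlast, hsep, hv] using hwf, v, rfl⟩
          have hres : solveInnerA lines L i (x :: xs)
              = solveInnerA lines L (i + 1) (x :: (xs ++ [v])) := by
            rw [solveInnerA.eq_def]
            simp [dif_pos hi, hcolI, hlast, hsep, hv]
          rw [hres]
          have hstep : pvStepB (total, some (decide (op = '+'), xs.foldl (pvOpFn op) x)) c
              = some (total, some (decide (op = '+'),
                  (xs ++ [v]).foldl (pvOpFn op) x)) := by
            simp only [pvStepB, hlast, hsep, hv, List.foldl_append,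
              List.foldl_cons, List.foldl_nil]
            rcases hop with h | h <;> simp [h, pvOpFn]
          rw [List.foldlM_cons, hstep]
          simp only [Option.bind_eq_bind, Option.bind_some]
          exact (ih (i + 1) hdrop').2 hwf' op hop x (xs ++ [v]) total

-- ===== VERDICT (by name: the statement is the Claim_ definition above) =====
theorem solution_part_2_spec : Claim_equal_solution_part_2 := by
  intro input _hdom hpre
  unfold Spec_solution_part_2
  unfold Pre_solution_part_2 at hpre
  obtain ⟨hne, hlen, hwf⟩ := hpre
  set lines := pvLines input with hlines
  obtain ⟨first, rest, hl⟩ := List.exists_cons_of_ne_nil hne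
  have hheadI : lines.headI = first := by rw [hl]; rfl
  rw [hheadI] at hlen hwf
  have h0 : PySem.List.pyGet? lines 0 = some first := by
    rw [hl, PySem.List.pyGet?_zero]; rfl
  have hcolsD : ∀ i : Nat, i < first.length →
      (pvCols lines first.length).getD i [] = lines.map (fun l => l.getD i ' ') := by
    intro i hi
    simp [pvCols, List.getD_eq_getElem?_getD, hi]
  have hmap : ∀ i : Nat, i < first.length →
      lines.mapM (fun l => PySem.List.pyGet? l (i : Int))
        = some (lines.map (fun l => l.getD i ' ')) := by
    intro i hi
    refine pv_mapM_eq _ _ _ (fun l hlmem => ?_)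
    have hil : i < l.length := lt_of_lt_of_le hi (hlen l hlmem)
    rw [PySem.List.pyGet?_natCast, List.getElem?_eq_getElem hil]
    simp [List.getD_eq_getElem?_getD, List.getElem?_eq_getElem hil]
  have hcol : ∀ i : Nat, i < first.length →
      pvColA lines (i : Int) = some ((pvCols lines first.length).getD i []) := by
    intro i hi
    rw [pvColA, hmap i hi, hcolsD i hi]
  have hB := pv_mapM_eq
    (fun i : Nat => lines.mapM (fun l => PySem.List.pyGet? l (i : Int)))
    (fun i : Nat => lines.map (fun l => l.getD i ' '))
    (List.range first.length)
    (fun i himem => hmap i (List.mem_range.mp himem))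
  have hmain := (pv_main lines first.length hcol
    (pvCols lines first.length) 0 (by simp)).1 hwf 0
  show solution_part_2 input = solution_part_2_alt input
  unfold solution_part_2 solution_part_2_alt
  rw [← hlines, h0]
  simp only [hB, hmain,
    show (List.range first.length).map (fun i : Nat => lines.map (fun l => l.getD i ' '))
        = pvCols lines first.length from rfl]
  cases hfold : (pvCols lines first.length).foldlM pvStepB (0, (none : Option (Bool × Int))) with
  | none => simp [pvFinish]
  | some r =>
    obtain ⟨t, g⟩ := r
    cases g with
    | none => simp [pvFinish]
    | some p => obtain ⟨b, a⟩ := p; simp [pvFinish]
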